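-- pv_equiv track=rewrite | github.com/beeka/unifolio | grapher.py | getEntryBefore
-- ===== SOURCE A (Python) =====
-- def getEntryBefore(entries, date):
-- 	if date in entries:
-- 		return entries[date]
-- 	else:
-- 		bestDate = None
-- 		for thisDate in entries.keys():
-- 			if thisDate < date:
-- 				if bestDate == None or thisDate > bestDate:
-- 					bestDate = thisDate
--
-- 		if bestDate == None:
-- 			# No match
-- 			return None
-- 		else:
-- 			return entries[bestDate]
-- ===== SOURCE B (Python) =====
-- def getEntryBefore(entries, date):
-- 	# Sort the keys descending and return the value of the first key <= date.
-- 	# The greatest key <= date is exactly the first such key in descending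
-- 	# order (an exact match is that maximum, since no key exceeds date there).
-- 	for k in sorted(entries, reverse=True):
-- 		if k <= date:
-- 			return entries[k]
-- 	return None
-- ===== Notes on version B (the rewrite author's own statement) =====
-- stated objective: alternative
-- what changed: Replaced A's membership fast path plus strict-less max-tracking loop with a sort of the keys in descending order followed by an early-exit scan returning the value of the first key <= date.
import Mathlib
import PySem

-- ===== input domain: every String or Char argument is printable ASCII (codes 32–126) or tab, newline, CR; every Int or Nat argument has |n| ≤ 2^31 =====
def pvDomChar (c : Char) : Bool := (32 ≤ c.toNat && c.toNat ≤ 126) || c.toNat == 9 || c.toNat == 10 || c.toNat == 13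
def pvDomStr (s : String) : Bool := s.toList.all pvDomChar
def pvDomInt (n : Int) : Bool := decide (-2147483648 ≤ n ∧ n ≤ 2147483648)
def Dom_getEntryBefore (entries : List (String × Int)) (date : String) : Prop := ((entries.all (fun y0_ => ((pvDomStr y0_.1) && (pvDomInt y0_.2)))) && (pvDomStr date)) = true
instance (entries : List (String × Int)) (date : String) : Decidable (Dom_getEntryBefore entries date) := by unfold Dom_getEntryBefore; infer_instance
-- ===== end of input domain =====

-- B replaces A's membership fast path + strict-less max-tracking loop with a descending sort of the keys
-- followed by an early-exit scan for the first key ≤ date (alternative decomposition, same task, different algorithm).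
-- dict → assoc list: 'date in entries' is key membership, 'entries[k]' is first-match lookup (List.lookup; exact for dicts, whose keys are unique).

-- ===== PORT A =====
-- A's loop body: 'if thisDate < date: if bestDate == None or thisDate > bestDate: bestDate = thisDate'
def pvStepA (date : String) (bestDate : Option String) (thisDate : String) : Option String :=
  if thisDate < date then
    match bestDate with
    | none => some thisDate
    | some b => if b < thisDate then some thisDate else bestDate
  else bestDate

def getEntryBefore (entries : List (String × Int)) (date : String) : Option Int :=
  if date ∈ entries.map Prod.fst then
    entries.lookup date
  else
    let bestDate := (entries.map Prod.fst).foldl (pvStepA date) none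
    match bestDate with
    | none => none
    | some b => entries.lookup b

-- ===== PORT B =====
-- B's loop: 'for k in sorted(entries, reverse=True): if k <= date: return entries[k]'
def pvFirstLE (date : String) : List String → Option String
  | [] => none
  | k :: rest => if k ≤ date then some k else pvFirstLE date rest

def getEntryBefore_alt (entries : List (String × Int)) (date : String) : Option Int :=
  match pvFirstLE date (PySem.List.sorted (entries.map Prod.fst) (fun x => x) true) with
  | none => none
  | some k => entries.lookup k

-- ===== PRECONDITION & SPEC =====
def Spec_getEntryBefore (entries : List (String × Int)) (date : String) (out : Option Int) : Prop := out = getEntryBefore_alt entries date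
instance (entries : List (String × Int)) (date : String) (out : Option Int) : Decidable (Spec_getEntryBefore entries date out) := by unfold Spec_getEntryBefore; infer_instance

-- ===== CLAIM (what is proved, stated in full; the proofs are below) =====
def Claim_equal_getEntryBefore : Prop := ∀ (entries : List (String × Int)) (date : String), Dom_getEntryBefore entries date → Spec_getEntryBefore entries date (getEntryBefore entries date)

-- ===== LEMMAS AND PROOFS =====

-- both programs compute the greatest key ≤ date; 'pvIsBest date l m' characterises that value
def pvIsBest (date : String) (l : List String) : Option String → Prop
  | none => ∀ y ∈ l, ¬ y ≤ date
  | some x => x ∈ l ∧ x ≤ date ∧ ∀ y ∈ l, y ≤ date → y ≤ x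

-- the characterisation pins the value down, up to permutation of the key list
theorem pvIsBest_unique (date : String) (l l' : List String) (hperm : l.Perm l')
    (m m' : Option String) (h : pvIsBest date l m) (h' : pvIsBest date l' m') : m = m' := by
  cases m with
  | none =>
    cases m' with
    | none => rfl
    | some x => exact absurd h'.2.1 (h x (hperm.mem_iff.mpr h'.1))
  | some x =>
    cases m' with
    | none => exact absurd h.2.1 (h' x (hperm.mem_iff.mp h.1))
    | some y =>
      have h1 : x ≤ y := h'.2.2 x (hperm.mem_iff.mp h.1) h.2.1
      have h2 : y ≤ x := h.2.2 y (hperm.mem_iff.mpr h'.1) h'.2.1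
      rw [le_antisymm h1 h2]

-- B's scan over a descending list finds the greatest key ≤ date
theorem pvFirstLE_isBest (date : String) (s : List String)
    (hs : s.Pairwise (fun a b => b ≤ a)) : pvIsBest date s (pvFirstLE date s) := by
  induction s with
  | nil => intro y hy; cases hy
  | cons k s ih =>
    rw [List.pairwise_cons] at hs
    by_cases hk : k ≤ date
    · simp only [pvFirstLE, if_pos hk]
      refine ⟨List.mem_cons_self, hk, ?_⟩
      intro y hy _
      rcases List.mem_cons.mp hy with h | h
      · exact le_of_eq h
      · exact hs.1 y h
    · simp only [pvFirstLE, if_neg hk]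
      have hr := ih hs.2
      cases hrv : pvFirstLE date s with
      | none =>
        rw [hrv] at hr
        intro y hy
        rcases List.mem_cons.mp hy with h | h
        · exact h ▸ hk
        · exact hr y h
      | some x =>
        rw [hrv] at hr
        exact ⟨List.mem_cons_of_mem _ hr.1, hr.2.1,
          fun y hy hyd => by
            rcases List.mem_cons.mp hy with h | h
            · exact absurd (h ▸ hyd) hk
            · exact hr.2.2 y h hyd⟩

-- A's fold maintains: the accumulator is none and nothing seen is ≤ date, or it holds the
-- greatest element ≤ date among the accumulator's content and the keys seen (date not a key)
theorem pvFoldA_inv (date : String) (l : List String) (hm : date ∉ l) :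
    ∀ b : Option String, (∀ x, b = some x → x ≤ date) →
      (l.foldl (pvStepA date) b = b ∧ ∀ y ∈ l, ¬ y ≤ date) ∨
      (∃ x, l.foldl (pvStepA date) b = some x ∧ (x ∈ l ∨ b = some x) ∧ x ≤ date ∧
        (∀ y ∈ l, y ≤ date → y ≤ x) ∧ (∀ z, b = some z → z ≤ x)) := by
  induction l with
  | nil => intro b _; left; exact ⟨rfl, fun y hy => absurd hy List.not_mem_nil⟩
  | cons d l ih =>
    intro b hb
    have hd : d ≠ date := fun h => hm (h ▸ List.mem_cons_self)
    have hm' : date ∉ l := fun h => hm (List.mem_cons_of_mem _ h)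
    by_cases hdd : d ≤ date
    · have hlt : d < date := lt_of_le_of_ne hdd hd
      -- the step yields some c with d ≤ c ≤ date, c bounding b, and c = d or c from b
      obtain ⟨c, hc, hcd, hdc, hbz, hor⟩ :
          ∃ c, pvStepA date b d = some c ∧ c ≤ date ∧ d ≤ c ∧
            (∀ z, b = some z → z ≤ c) ∧ (c = d ∨ b = some c) := by
        unfold pvStepA
        rw [if_pos hlt]
        cases b with
        | none =>
          refine ⟨d, rfl, hdd, le_refl _, ?_, Or.inl rfl⟩
          intro z hz
          exact nomatch hz
        | some z =>
          dsimp only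
          by_cases hz : z < d
          · rw [if_pos hz]
            exact ⟨d, rfl, hdd, le_refl _,
              fun w hw => by cases hw; exact le_of_lt hz, Or.inl rfl⟩
          · rw [if_neg hz]
            exact ⟨z, rfl, hb _ rfl, not_lt.mp hz,
              fun w hw => by cases hw; exact le_refl _, Or.inr rfl⟩
      rw [List.foldl_cons, hc]
      rcases ih hm' (some c) (fun x hx => by cases hx; exact hcd) with
        ⟨heq, hnone⟩ | ⟨x, hx, hxmem, hxd, hmax, hzx⟩
      · right
        refine ⟨c, by rw [heq], ?_, hcd, ?_, hbz⟩
        · rcases hor with h | h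
          · exact Or.inl (h ▸ List.mem_cons_self)
          · exact Or.inr h
        · intro y hy hyd
          rcases List.mem_cons.mp hy with h | h
          · exact h ▸ hdc
          · exact absurd hyd (hnone y h)
      · right
        have hcx : c ≤ x := hzx c rfl
        refine ⟨x, hx, ?_, hxd, ?_, fun z hz => le_trans (hbz z hz) hcx⟩
        · rcases hxmem with h | h
          · exact Or.inl (List.mem_cons_of_mem _ h)
          · cases h
            rcases hor with h2 | h2
            · exact Or.inl (h2 ▸ List.mem_cons_self)
            · exact Or.inr h2
        · intro y hy hyd
          rcases List.mem_cons.mp hy with h | h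
          · exact h ▸ le_trans hdc hcx
          · exact hmax y h hyd
    · have hstep : pvStepA date b d = b := by
        unfold pvStepA
        rw [if_neg (fun h => hdd (le_of_lt h))]
      rw [List.foldl_cons, hstep]
      rcases ih hm' b hb with ⟨heq, hnone⟩ | ⟨x, hx, hxmem, hxd, hmax, hzx⟩
      · left
        refine ⟨heq, fun y hy => ?_⟩
        rcases List.mem_cons.mp hy with h | h
        · exact h ▸ hdd
        · exact hnone y h
      · right
        refine ⟨x, hx, ?_, hxd, fun y hy hyd => ?_, hzx⟩
        · rcases hxmem with h | h
          · exact Or.inl (List.mem_cons_of_mem _ h)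
          · exact Or.inr h
        · rcases List.mem_cons.mp hy with h | h
          · exact absurd (h ▸ hyd) hdd
          · exact hmax y h hyd

-- hence A's fold from none finds the greatest key ≤ date, provided date itself is not a key
theorem pvFoldA_isBest (date : String) (l : List String) (hm : date ∉ l) :
    pvIsBest date l (l.foldl (pvStepA date) none) := by
  rcases pvFoldA_inv date l hm none (fun x hx => nomatch hx) with
    ⟨heq, hnone⟩ | ⟨x, hx, hxmem, hxd, hmax, _⟩
  · rw [heq]; exact hnone
  · rw [hx]
    rcases hxmem with h | h
    · exact ⟨h, hxd, hmax⟩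
    · cases h

-- if date itself is a key, B's scan returns some date
theorem pvFirstLE_of_mem (date : String) (s : List String)
    (hs : s.Pairwise (fun a b => b ≤ a)) (hm : date ∈ s) :
    pvFirstLE date s = some date := by
  have h := pvFirstLE_isBest date s hs
  cases hrv : pvFirstLE date s with
  | none => rw [hrv] at h; exact absurd (le_refl date) (h date hm)
  | some x =>
    rw [hrv] at h
    have h1 : date ≤ x := h.2.2 date hm (le_refl date)
    rw [le_antisymm h.2.1 h1]

-- ===== VERDICT (by name: the statement is the Claim_ definition above) =====
theorem getEntryBefore_spec : Claim_equal_getEntryBefore := by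
  intro entries date _
  unfold Spec_getEntryBefore getEntryBefore getEntryBefore_alt
  set l := entries.map Prod.fst with hl
  set s := PySem.List.sorted l (fun x => x) true with hs
  have hperm : s.Perm l := PySem.List.sorted_perm l (fun x => x) true
  have hpair : s.Pairwise (fun a b => b ≤ a) := PySem.List.sorted_pairwise_rev l (fun x => x)
  by_cases h : date ∈ l
  · rw [if_pos h, pvFirstLE_of_mem date s hpair (hperm.mem_iff.mpr h)]
  · rw [if_neg h]
    have hA := pvFoldA_isBest date l h
    have hB := pvFirstLE_isBest date s hpair
    have heq : l.foldl (pvStepA date) none = pvFirstLE date s :=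
      pvIsBest_unique date l s hperm.symm _ _ hA hB
    rw [heq]
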